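-- pv_equiv track=rewrite | github.com/LK-LAB/PPPV | PPPV2023.py | kpath_parser
-- ===== SOURCE A (Python) =====
-- def kpath_parser(kpath_list):
--     n_parts = len(kpath_list)
--     kpath_temp = [part.split('-') for part in kpath_list]
--     for idx, part in enumerate(kpath_temp):
--         if idx+1 < n_parts:
--             part[-1] = '{}/{}'.format(part[-1], kpath_temp[idx+1][0])
--             kpath_temp[idx] = part
--             kpath_temp[idx+1] = kpath_temp[idx+1][1:]
--
--     kpath_ = []
--     for part in kpath_temp:
--         kpath_ += part
--
--     for i in range(len(kpath_)):
--         if "G" in kpath_[i]: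
--             kpath_[i] = kpath_[i].replace("G", "$\Gamma$")
--         elif "g" in kpath_[i]:
--             kpath_[i] = kpath_[i].replace("g", "$\Gamma$")
--
--     return kpath_
-- ===== SOURCE B (Python) =====
-- def kpath_parser(kpath_list):
--     if not kpath_list:
--         return []
--     tokens = '/'.join(kpath_list).split('-')
--     kpath_ = []
--     for tok in tokens:
--         if "G" in tok:
--             tok = tok.replace("G", "$\Gamma$")
--         elif "g" in tok:
--             tok = tok.replace("g", "$\Gamma$")
--         kpath_.append(tok)
--     return kpath_
-- ===== Notes on version B (the rewrite author's own statement) =====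
-- stated objective: simpler
-- what changed: Replaces the index-mutating per-segment merge loop (split each segment, fuse each segment's last token with the next segment's first, drop it, then flatten) by a single '/'.join of the segments followed by one split('-'), with an empty-input guard; the Gamma substitution stays a per-token pass.
import Mathlib
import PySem

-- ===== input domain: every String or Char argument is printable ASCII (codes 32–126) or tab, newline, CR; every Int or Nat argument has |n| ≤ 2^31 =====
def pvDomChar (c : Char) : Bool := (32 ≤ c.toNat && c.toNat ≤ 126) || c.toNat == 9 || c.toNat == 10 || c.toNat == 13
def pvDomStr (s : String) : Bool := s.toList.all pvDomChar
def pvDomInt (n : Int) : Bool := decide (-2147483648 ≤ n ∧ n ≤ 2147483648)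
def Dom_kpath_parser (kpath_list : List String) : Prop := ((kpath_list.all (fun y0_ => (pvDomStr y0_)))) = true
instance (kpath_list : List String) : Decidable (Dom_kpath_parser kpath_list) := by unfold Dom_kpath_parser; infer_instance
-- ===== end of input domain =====

-- B replaces A's index-mutating segment-merge loop by one '/'.join followed by a single split('-') (simpler); the Gamma pass is unchanged.


-- s.split('-')  (total: the separator "-" is nonempty, so Str.split? never returns none); used by both ports
def kpSplitS (s : String) : List String := (PySem.Str.split? s "-").getD []

-- ===== PORT A =====
-- one step of A's 'for idx, part in enumerate(kpath_temp)' loop (mutates positions idx and idx+1)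
def kpStepA (n_parts : Nat) (temp : List (List String)) (idx : Nat) : List (List String) :=
  if idx + 1 < n_parts then
    let part := temp.getD idx []
    match PySem.List.pyGet? part (-1), PySem.List.pyGet? (temp.getD (idx + 1) []) 0 with
    | some lastTok, some headTok =>
        let part := part.set (part.length - 1) (lastTok ++ "/" ++ headTok)  -- part[-1] = '{}/{}'.format(...)
        let temp := temp.set idx part                                        -- kpath_temp[idx] = part
        temp.set (idx + 1) (PySem.List.slice (temp.getD (idx + 1) []) (some 1) none)  -- kpath_temp[idx+1] = kpath_temp[idx+1][1:]
    | _, _ => temp  -- Python raises IndexError here; excluded by Pre_kpath_parser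
  else temp

-- 'kpath_[i] = kpath_[i].replace(...)' body of A's final loop
def kpGammaA (t : String) : String :=
  if PySem.Str.isIn "G" t then PySem.Str.replace t "G" "$\\Gamma$"
  else if PySem.Str.isIn "g" t then PySem.Str.replace t "g" "$\\Gamma$"
  else t

def kpath_parser (kpath_list : List String) : List String :=
  let n_parts := kpath_list.length
  let kpath_temp := kpath_list.map kpSplitS
  let kpath_temp := (List.range kpath_temp.length).foldl (kpStepA n_parts) kpath_temp
  let kpath_ := kpath_temp.foldl (fun acc part => acc ++ part) []
  kpath_.map kpGammaA

-- ===== PORT B =====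
def kpath_parser_alt (kpath_list : List String) : List String :=
  if kpath_list = [] then []
  else
    let tokens := kpSplitS (PySem.Str.join "/" kpath_list)
    tokens.foldl (fun acc tok =>
      acc ++ [if PySem.Str.isIn "G" tok then PySem.Str.replace tok "G" "$\\Gamma$"
              else if PySem.Str.isIn "g" tok then PySem.Str.replace tok "g" "$\\Gamma$"
              else tok]) []

-- ===== PRECONDITION & SPEC =====
-- Pre_ excludes exactly the inputs on which A raises IndexError: a middle segment with no '-'
-- (its one-token split is emptied by the previous merge, and then part[-1] reads the empty list).
def Pre_kpath_parser (kpath_list : List String) : Prop :=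
  ∀ s ∈ (kpath_list.drop 1).dropLast, '-' ∈ s.toList
instance (kpath_list : List String) : Decidable (Pre_kpath_parser kpath_list) := by
  unfold Pre_kpath_parser; infer_instance
def pvWitness_kpath_parser : List String := ["G-X", "Y-M", "g-R"]

def Spec_kpath_parser (kpath_list : List String) (out : List String) : Prop := out = kpath_parser_alt kpath_list
instance (kpath_list : List String) (out : List String) : Decidable (Spec_kpath_parser kpath_list out) := by unfold Spec_kpath_parser; infer_instance

-- ===== CLAIM (what is proved, stated in full; the proofs are below) =====
def Claim_equal_kpath_parser : Prop := ∀ (kpath_list : List String), Dom_kpath_parser kpath_list → Pre_kpath_parser kpath_list → Spec_kpath_parser kpath_list (kpath_parser kpath_list)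

-- ===== LEMMAS AND PROOFS =====

-- s.split('-') at the Chars level, as a structural recursion
def kpSplit : List Char → List (List Char)
  | [] => [[]]
  | c :: t => if c = '-' then [] :: kpSplit t else (kpSplit t).modifyHead (c :: ·)

lemma kpSplit_ne_nil (cs : List Char) : kpSplit cs ≠ [] := by
  induction cs with
  | nil => simp [kpSplit]
  | cons c t ih =>
    by_cases hc : c = '-'
    · simp [kpSplit, hc]
    · simp only [kpSplit, if_neg hc]
      cases h : kpSplit t with
      | nil => exact absurd h ih
      | cons a b => simp [List.modifyHead]

lemma kpModifyHead_id {α : Type} (l : List α) : l.modifyHead (fun x => x) = l := by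
  cases l <;> simp [List.modifyHead]

lemma kpSplit_go_spec (fuel : Nat) (l cur : List Char) (acc : List (List Char))
    (h : l.length < fuel) :
    PySem.Chars.splitOn.go ['-'] fuel l cur acc
      = acc.reverse ++ (kpSplit l).modifyHead (cur.reverse ++ ·) := by
  induction fuel generalizing l cur acc with
  | zero => omega
  | succ fuel ih =>
    cases l with
    | nil =>
      simp [PySem.Chars.splitOn.go, kpSplit, List.modifyHead]
    | cons c rest =>
      by_cases hc : c = '-'
      · subst hc
        have hpre : List.isPrefixOf ['-'] ('-' :: rest) = true := by simp [List.isPrefixOf]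
        simp only [PySem.Chars.splitOn.go, hpre, if_pos, List.length_cons, List.drop_succ_cons,
          List.length_nil, List.drop_zero]
        rw [ih rest [] (cur.reverse :: acc) (by simp at h; omega)]
        rw [show kpSplit ('-' :: rest) = [] :: kpSplit rest from by simp [kpSplit]]
        simp only [List.reverse_nil, List.nil_append, kpModifyHead_id]
        simp [List.modifyHead]
      · have hpre : List.isPrefixOf ['-'] (c :: rest) = false := by
          simp [List.isPrefixOf]
          intro hcc
          exact absurd hcc.symm hc
        simp only [PySem.Chars.splitOn.go, hpre]
        rw [if_neg (by simp)]
        rw [ih rest (c :: cur) acc (by simp at h; omega)]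
        simp only [kpSplit, if_neg hc, List.modifyHead_modifyHead]
        congr 1
        cases hk : kpSplit rest with
        | nil => exact absurd hk (kpSplit_ne_nil rest)
        | cons a b => simp [List.modifyHead, List.append_assoc]

lemma splitOn_eq_kpSplit (cs : List Char) : PySem.Chars.splitOn cs ['-'] = kpSplit cs := by
  unfold PySem.Chars.splitOn
  rw [kpSplit_go_spec (cs.length + 1) cs [] [] (by omega)]
  simp [kpModifyHead_id]

lemma kpSplitS_toList (s : String) :
    (kpSplitS s).map String.toList = kpSplit s.toList := by
  have hsep : ("-" : String).toList = ['-'] := rfl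
  simp only [kpSplitS, PySem.Str.split?, PySem.Chars.split?, hsep]
  rw [splitOn_eq_kpSplit]
  simp [List.map_map, Function.comp_def]

lemma kpSplitS_ne_nil (s : String) : kpSplitS s ≠ [] := by
  intro h
  have := kpSplitS_toList s
  rw [h] at this
  exact kpSplit_ne_nil s.toList this.symm

lemma kpSplit_length_of_mem (cs : List Char) (h : '-' ∈ cs) : 2 ≤ (kpSplit cs).length := by
  induction cs with
  | nil => simp at h
  | cons c t ih =>
    by_cases hc : c = '-'
    · simp only [kpSplit, if_pos hc, List.length_cons]
      have := kpSplit_ne_nil t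
      have : 1 ≤ (kpSplit t).length := List.length_pos_of_ne_nil this
      omega
    · have ht : '-' ∈ t := by
        rcases List.mem_cons.mp h with h' | h'
        · exact absurd h'.symm hc
        · exact h'
      simp only [kpSplit, if_neg hc, List.length_modifyHead]
      exact ih ht

lemma kpSplitS_tail_ne_nil (s : String) (hmem : '-' ∈ s.toList) :
    (kpSplitS s).tail ≠ [] := by
  have hlen2 : 2 ≤ (kpSplit s.toList).length := kpSplit_length_of_mem s.toList hmem
  have hlen : (kpSplitS s).length = (kpSplit s.toList).length := by
    rw [← kpSplitS_toList]; simp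
  intro ht
  cases hx : kpSplitS s with
  | nil => exact kpSplitS_ne_nil s hx
  | cons a t =>
    rw [hx] at ht hlen
    simp only [List.tail_cons] at ht
    subst ht
    simp only [List.length_cons, List.length_nil] at hlen
    omega

-- merging the boundary between two adjacent token lists (Chars level)
def kpMergeTok (u v : List (List Char)) : List (List Char) :=
  u.dropLast ++ (u.getLastD [] ++ '/' :: v.headI) :: v.tail

lemma kpGetLastD_irrel {α : Type} (l : List α) (h : l ≠ []) (d d' : α) :
    l.getLastD d = l.getLastD d' := by
  cases l with
  | nil => exact absurd rfl h
  | cons a t => rw [List.getLastD_cons, List.getLastD_cons]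

lemma kpMergeTok_modifyHead (c : Char) (u v : List (List Char)) (hu : u ≠ []) :
    kpMergeTok (u.modifyHead (c :: ·)) v = (kpMergeTok u v).modifyHead (c :: ·) := by
  cases u with
  | nil => exact absurd rfl hu
  | cons a u' =>
    cases u' with
    | nil => simp [kpMergeTok, List.modifyHead]
    | cons b u'' =>
      simp only [List.modifyHead, kpMergeTok, List.dropLast_cons_of_ne_nil (List.cons_ne_nil b u''),
        List.getLastD_cons, List.cons_append]

lemma kpSplit_append (xs ys : List Char) :
    kpSplit (xs ++ '/' :: ys) = kpMergeTok (kpSplit xs) (kpSplit ys) := by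
  induction xs with
  | nil =>
    cases hk : kpSplit ys with
    | nil => exact absurd hk (kpSplit_ne_nil ys)
    | cons a b =>
      simp [kpSplit, kpMergeTok, List.modifyHead, hk]
  | cons c t ih =>
    by_cases hc : c = '-'
    · subst hc
      rw [show kpSplit ('-' :: t ++ '/' :: ys) = [] :: kpSplit (t ++ '/' :: ys) from by
        simp [kpSplit]]
      rw [show kpSplit ('-' :: t) = [] :: kpSplit t from by simp [kpSplit]]
      rw [ih]
      cases hk : kpSplit t with
      | nil => exact absurd hk (kpSplit_ne_nil t)
      | cons a b =>
        cases b with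
        | nil => simp [kpMergeTok]
        | cons b0 bs =>
          simp [kpMergeTok, List.dropLast_cons_of_ne_nil]
    · rw [show kpSplit (c :: t ++ '/' :: ys)
          = (kpSplit (t ++ '/' :: ys)).modifyHead (c :: ·) from by simp [kpSplit, hc]]
      rw [show kpSplit (c :: t) = (kpSplit t).modifyHead (c :: ·) from by simp [kpSplit, hc]]
      rw [ih]
      exact (kpMergeTok_modifyHead c (kpSplit t) (kpSplit ys) (kpSplit_ne_nil t)).symm

-- merging at the String level
def kpMergeS (u v : List String) : List String :=
  u.dropLast ++ (u.getLastD "" ++ "/" ++ v.headI) :: v.tail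

lemma kpHeadI_toList (v : List String) :
    (v.map String.toList).headI = v.headI.toList := by
  cases v <;> rfl

lemma kpGetLastD_toList (u : List String) (d : String) :
    (u.map String.toList).getLastD d.toList = (u.getLastD d).toList := by
  induction u generalizing d with
  | nil => simp
  | cons a t ih => simp only [List.map_cons, List.getLastD_cons]; exact ih a

lemma kpGetLastD_toList' (u : List String) :
    (u.map String.toList).getLastD [] = (u.getLastD "").toList := by
  have := kpGetLastD_toList u ""
  rwa [show ("" : String).toList = ([] : List Char) from rfl] at this

lemma kpMergeS_toList (u v : List String) :
    (kpMergeS u v).map String.toList = kpMergeTok (u.map String.toList) (v.map String.toList) := by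
  simp only [kpMergeS, kpMergeTok, List.map_append, List.map_cons, List.map_dropLast,
    List.map_tail, String.toList_append, kpHeadI_toList, kpGetLastD_toList']
  simp [show ("/" : String).toList = ['/'] from rfl]

-- what A's merge loop leaves in kpath_temp
def kpMergeAll : List (List String) → List (List String)
  | [] => []
  | [x] => [x]
  | x :: y :: rest =>
      (x.set (x.length - 1) (x.getLastD "" ++ "/" ++ y.headI)) :: kpMergeAll (y.tail :: rest)
termination_by l => l.length
decreasing_by simp

-- B's token list, computed segment-by-segment
def kpSpecT : List (List String) → List String
  | [] => []
  | [t] => t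
  | t :: y :: rest => kpMergeS t (kpSpecT (y :: rest))

lemma kpGetD_mid (done : List (List String)) (cur : List String) (rest : List (List String)) :
    (done ++ cur :: rest).getD done.length [] = cur := by
  induction done with
  | nil => simp [List.getD]
  | cons d t ih => simp [List.getD]

lemma kpSet_mid (done : List (List String)) (cur z : List String) (rest : List (List String)) :
    (done ++ cur :: rest).set done.length z = done ++ z :: rest := by
  induction done with
  | nil => simp
  | cons d t ih => simp

lemma kpPyGet_last {α : Type} (xs : List α) (h : xs ≠ []) (d : α) :
    PySem.List.pyGet? xs (-1) = some (xs.getLastD d) := by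
  have hn : 0 < xs.length := List.length_pos_of_ne_nil h
  simp [PySem.List.pyGet?, PySem.List.pyIdx?]
  rw [if_pos (by omega : 1 ≤ xs.length)]
  simp only [Option.bind_some]
  rw [← List.getLast?_eq_getElem?]
  cases hx : xs.getLast? with
  | none => exact absurd (List.getLast?_eq_none_iff.mp hx) h
  | some a => simp

lemma kpPyGet_zero {α : Type} [Inhabited α] (xs : List α) (h : xs ≠ []) :
    PySem.List.pyGet? xs 0 = some xs.headI := by
  have hn : 0 < xs.length := List.length_pos_of_ne_nil h
  simp [PySem.List.pyGet?, PySem.List.pyIdx?]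
  rw [if_pos hn]
  cases xs with
  | nil => exact absurd rfl h
  | cons a t => simp

lemma kpSet_last (x : List String) (a : String) (hx : x ≠ []) :
    x.set (x.length - 1) a = x.dropLast ++ [a] := by
  induction x with
  | nil => exact absurd rfl hx
  | cons b t ih =>
    cases t with
    | nil => simp
    | cons c u =>
      have h1 : (b :: c :: u).length - 1 = ((c :: u).length - 1) + 1 := by simp
      rw [h1]
      simp only [List.set_cons_succ, ih (List.cons_ne_nil c u),
        List.dropLast_cons_of_ne_nil (List.cons_ne_nil c u), List.cons_append]

lemma kpStep_eval (done : List (List String)) (cur y : List String) (rest' : List (List String))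
    (m : Nat) (hm : done.length + 1 < m) (hcur : cur ≠ []) (hy : y ≠ []) :
    kpStepA m (done ++ cur :: y :: rest') done.length
      = done ++ (cur.set (cur.length - 1) (cur.getLastD "" ++ "/" ++ y.headI)) :: y.tail :: rest' := by
  unfold kpStepA
  rw [if_pos hm]
  dsimp only
  have e1 : (done ++ cur :: y :: rest').getD (done.length + 1) [] = y := by
    have hrw : done ++ cur :: y :: rest' = (done ++ [cur]) ++ y :: rest' := by simp
    rw [hrw]
    have hl : done.length + 1 = (done ++ [cur]).length := by simp
    rw [hl]
    exact kpGetD_mid (done ++ [cur]) y rest'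
  rw [kpGetD_mid done cur (y :: rest'), kpPyGet_last cur hcur "", e1, kpPyGet_zero y hy]
  dsimp only
  rw [kpSet_mid done cur _ (y :: rest')]
  have e2 : (done ++ (cur.set (cur.length - 1) (cur.getLastD "" ++ "/" ++ y.headI)) :: y :: rest').getD (done.length + 1) [] = y := by
    have hrw : done ++ (cur.set (cur.length - 1) (cur.getLastD "" ++ "/" ++ y.headI)) :: y :: rest'
        = (done ++ [cur.set (cur.length - 1) (cur.getLastD "" ++ "/" ++ y.headI)]) ++ y :: rest' := by simp
    rw [hrw]
    have hl : done.length + 1 = (done ++ [cur.set (cur.length - 1) (cur.getLastD "" ++ "/" ++ y.headI)]).length := by simp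
    rw [hl]
    exact kpGetD_mid _ y rest'
  rw [e2]
  rw [PySem.List.slice_from y (by norm_num : (0:Int) ≤ 1)]
  have hrw2 : done ++ (cur.set (cur.length - 1) (cur.getLastD "" ++ "/" ++ y.headI)) :: y :: rest'
      = (done ++ [cur.set (cur.length - 1) (cur.getLastD "" ++ "/" ++ y.headI)]) ++ y :: rest' := by simp
  rw [hrw2]
  have hl2 : done.length + 1 = (done ++ [cur.set (cur.length - 1) (cur.getLastD "" ++ "/" ++ y.headI)]).length := by simp
  rw [hl2, kpSet_mid _ y _ rest']
  simp [List.drop_one, Int.toNat_one]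

lemma kpLoop_inv (rest : List (List String)) : ∀ (done : List (List String)) (cur : List String),
    (rest ≠ [] → cur ≠ []) → (∀ y ∈ rest, y ≠ []) → (∀ y ∈ rest.dropLast, y.tail ≠ []) →
    (List.range' done.length (rest.length + 1)).foldl
        (kpStepA (done.length + (rest.length + 1))) (done ++ cur :: rest)
      = done ++ kpMergeAll (cur :: rest) := by
  induction rest with
  | nil =>
    intro done cur _ _ _
    simp only [List.length_nil, Nat.zero_add, List.range'_one, List.foldl_cons, List.foldl_nil]
    rw [kpStepA, if_neg (by omega)]
    simp [kpMergeAll]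
  | cons y rest' ih =>
    intro done cur h1 h2 h3
    have hcur : cur ≠ [] := h1 (by simp)
    have hy : y ≠ [] := h2 y (by simp)
    rw [List.range'_succ, List.foldl_cons]
    rw [show done.length + ((y :: rest').length + 1) = done.length + (rest'.length + 2) by simp]
    rw [kpStep_eval done cur y rest' _ (by omega) hcur hy]
    have h1' : rest' ≠ [] → y.tail ≠ [] := by
      intro hne
      exact h3 y (by rw [List.dropLast_cons_of_ne_nil hne]; exact List.mem_cons_self)
    have h2' : ∀ z ∈ rest', z ≠ [] := fun z hz => h2 z (List.mem_cons_of_mem y hz)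
    have h3' : ∀ z ∈ rest'.dropLast, z.tail ≠ [] := by
      intro z hz
      apply h3 z
      cases rest' with
      | nil => simp at hz
      | cons w t =>
        rw [List.dropLast_cons_of_ne_nil (List.cons_ne_nil w t)]
        exact List.mem_cons_of_mem y hz
    have hstate : done ++ (cur.set (cur.length - 1) (cur.getLastD "" ++ "/" ++ y.headI)) :: y.tail :: rest'
        = (done ++ [cur.set (cur.length - 1) (cur.getLastD "" ++ "/" ++ y.headI)]) ++ y.tail :: rest' := by simp
    rw [hstate]
    have hlen : done.length + 1 = (done ++ [cur.set (cur.length - 1) (cur.getLastD "" ++ "/" ++ y.headI)]).length := by simp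
    rw [show done.length + (rest'.length + 2) = (done.length + 1) + (rest'.length + 1) by omega]
    rw [hlen]
    simp only [List.length_cons]
    rw [ih _ y.tail h1' h2' h3']
    have : kpMergeAll (cur :: y :: rest')
        = (cur.set (cur.length - 1) (cur.getLastD "" ++ "/" ++ y.headI)) :: kpMergeAll (y.tail :: rest') := by
      rw [kpMergeAll]
    rw [this]
    simp

lemma kpMergeS_cons (y : List String) (v : List String) (hy : y ≠ []) (hyt : y.tail ≠ []) :
    kpMergeS y v = y.headI :: kpMergeS y.tail v := by
  cases y with
  | nil => exact absurd rfl hy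
  | cons a t =>
    simp only [List.tail_cons] at hyt ⊢
    simp only [kpMergeS, List.dropLast_cons_of_ne_nil hyt, List.getLastD_cons, List.headI,
      List.cons_append]
    rw [kpGetLastD_irrel t hyt a ""]

lemma kpMergeAll_flatten (ts : List (List String)) : ∀ (x : List String),
    (ts ≠ [] → x ≠ []) → (∀ y ∈ ts, y ≠ []) → (∀ y ∈ ts.dropLast, y.tail ≠ []) →
    (kpMergeAll (x :: ts)).flatten = kpSpecT (x :: ts) := by
  induction ts with
  | nil => intro x _ _ _; simp [kpMergeAll, kpSpecT]
  | cons y ts' ih =>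
    intro x h1 h2 h3
    have hx : x ≠ [] := h1 (by simp)
    have hy : y ≠ [] := h2 y (by simp)
    have h1' : ts' ≠ [] → y.tail ≠ [] := by
      intro hne
      exact h3 y (by rw [List.dropLast_cons_of_ne_nil hne]; exact List.mem_cons_self)
    have h2' : ∀ z ∈ ts', z ≠ [] := fun z hz => h2 z (List.mem_cons_of_mem y hz)
    have h3' : ∀ z ∈ ts'.dropLast, z.tail ≠ [] := by
      intro z hz
      apply h3 z
      cases ts' with
      | nil => simp at hz
      | cons w t =>
        rw [List.dropLast_cons_of_ne_nil (List.cons_ne_nil w t)]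
        exact List.mem_cons_of_mem y hz
    have hunf : kpMergeAll (x :: y :: ts')
        = (x.set (x.length - 1) (x.getLastD "" ++ "/" ++ y.headI)) :: kpMergeAll (y.tail :: ts') := by
      rw [kpMergeAll]
    rw [hunf]
    rw [List.flatten_cons]
    rw [ih y.tail h1' h2' h3']
    rw [kpSet_last x _ hx]
    cases ts' with
    | nil =>
      simp [kpSpecT, kpMergeS]
    | cons z ts'' =>
      have hyt : y.tail ≠ [] := h1' (List.cons_ne_nil z ts'')
      show x.dropLast ++ [x.getLastD "" ++ "/" ++ y.headI] ++ kpSpecT (y.tail :: z :: ts'')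
          = kpSpecT (x :: y :: z :: ts'')
      rw [show kpSpecT (x :: y :: z :: ts'') = kpMergeS x (kpSpecT (y :: z :: ts'')) from rfl]
      rw [show kpSpecT (y :: z :: ts'') = kpMergeS y (kpSpecT (z :: ts'')) from rfl]
      rw [show kpSpecT (y.tail :: z :: ts'') = kpMergeS y.tail (kpSpecT (z :: ts'')) from rfl]
      rw [kpMergeS_cons y _ hy hyt]
      simp [kpMergeS, List.append_assoc]

lemma kpListStr_ext (xs ys : List String) (h : xs.map String.toList = ys.map String.toList) :
    xs = ys := by
  have hinj : Function.Injective String.toList := fun a b hab => String.toList_inj.mp hab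
  exact List.map_injective_iff.mpr hinj h

lemma kpJoin_singleton (s : String) : PySem.Str.join "/" [s] = s := by
  simp [PySem.Str.join, PySem.Chars.join, List.intercalate]

lemma kpJoin_toList (s : String) (l : List String) (hl : l ≠ []) :
    (PySem.Str.join "/" (s :: l)).toList = s.toList ++ '/' :: (PySem.Str.join "/" l).toList := by
  cases l with
  | nil => exact absurd rfl hl
  | cons b t =>
    simp only [PySem.Str.join, PySem.Chars.join, List.map_cons]
    simp [List.intercalate, show ("/" : String).toList = ['/'] from rfl]

lemma kpKey (s : String) (l : List String) (hl : l ≠ []) :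
    kpSplitS (PySem.Str.join "/" (s :: l))
      = kpMergeS (kpSplitS s) (kpSplitS (PySem.Str.join "/" l)) := by
  apply kpListStr_ext
  rw [kpSplitS_toList, kpMergeS_toList, kpSplitS_toList, kpSplitS_toList]
  rw [kpJoin_toList s l hl]
  exact kpSplit_append s.toList (PySem.Str.join "/" l).toList

lemma kpSpecT_split_join (l : List String) : l ≠ [] →
    (∀ s ∈ (l.drop 1).dropLast, '-' ∈ s.toList) →
    kpSpecT (l.map kpSplitS) = kpSplitS (PySem.Str.join "/" l) := by
  induction l with
  | nil => intro h; exact absurd rfl h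
  | cons s l' ih =>
    intro _ hmid
    cases l' with
    | nil =>
      rw [kpJoin_singleton]
      rfl
    | cons b t =>
      have hmid' : ∀ u ∈ ((b :: t).drop 1).dropLast, '-' ∈ u.toList := by
        intro u hu
        apply hmid
        simp only [List.drop_succ_cons, List.drop_zero] at hu ⊢
        cases t with
        | nil => simp at hu
        | cons w t' =>
          rw [List.dropLast_cons_of_ne_nil (List.cons_ne_nil w t')]
          exact List.mem_cons_of_mem b hu
      have hrec := ih (List.cons_ne_nil b t) hmid'
      show kpMergeS (kpSplitS s) (kpSpecT ((b :: t).map kpSplitS))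
          = kpSplitS (PySem.Str.join "/" (s :: b :: t))
      rw [hrec, kpKey s (b :: t) (List.cons_ne_nil b t)]

-- ===== VERDICT (by name: the statement is the Claim_ definition above) =====
theorem kpath_parser_spec : Claim_equal_kpath_parser := by
  intro l _ hpre
  unfold Spec_kpath_parser
  cases l with
  | nil => rfl
  | cons s ls =>
    have hrest2 : ∀ y ∈ ls.map kpSplitS, y ≠ [] := by
      intro y hy
      obtain ⟨t, _, rfl⟩ := List.mem_map.mp hy
      exact kpSplitS_ne_nil t
    have hrest3 : ∀ y ∈ (ls.map kpSplitS).dropLast, y.tail ≠ [] := by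
      intro y hy
      rw [show (ls.map kpSplitS).dropLast = ls.dropLast.map kpSplitS from by
        simp [List.map_dropLast]] at hy
      obtain ⟨t, ht, rfl⟩ := List.mem_map.mp hy
      apply kpSplitS_tail_ne_nil
      apply hpre
      simpa using ht
    have hloop := kpLoop_inv (ls.map kpSplitS) [] (kpSplitS s)
      (fun _ => kpSplitS_ne_nil s) hrest2 hrest3
    simp only [List.nil_append, List.length_nil, Nat.zero_add, List.length_map] at hloop
    show (((List.range ((s :: ls).map kpSplitS).length).foldl (kpStepA (s :: ls).length)
        ((s :: ls).map kpSplitS)).foldl (fun acc part => acc ++ part) []).map kpGammaA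
      = kpath_parser_alt (s :: ls)
    rw [List.range_eq_range']
    simp only [List.length_map, List.length_cons, List.map_cons]
    rw [hloop]
    rw [PySem.List.foldl_append_eq_flatten, List.nil_append]
    rw [kpMergeAll_flatten (ls.map kpSplitS) (kpSplitS s)
      (fun _ => kpSplitS_ne_nil s) hrest2 hrest3]
    have hsp := kpSpecT_split_join (s :: ls) (List.cons_ne_nil s ls) hpre
    simp only [List.map_cons] at hsp
    rw [hsp]
    rw [kpath_parser_alt, if_neg (List.cons_ne_nil s ls)]
    dsimp only
    rw [PySem.List.foldl_append_singleton_eq_map]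
    simp only [List.nil_append]
    rfl
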